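-- pv_equiv track=rewrite | github.com/pfptcommunity/senderstats | src/senderstats/common/address_tools.py | convert_srs_batch
-- ===== SOURCE A (Python) =====
-- from typing import Iterable, List
--
-- def convert_srs_batch(emails: Iterable[str]) -> List[str]:
--     out: List[str] = []
--     ap = out.append
--
--     for email in emails:
--         if not email:
--             ap(email);
--             continue
--
--         at = email.find("@")
--         if at < 0:
--             ap(email);
--             continue
--
--         p = email.find("srs")
--         if p < 0 or p >= at:
--             ap(email);
--             continue
--
--         if p != 0 and email[p - 1] != "+":
--             ap(email);
--             continue
--
--         eq0 = email.find("=", p)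
--         if eq0 < 0 or eq0 >= at:
--             ap(email);
--             continue
--
--         eq1 = email.find("=", eq0 + 1)
--         if eq1 < 0 or eq1 >= at:
--             ap(email);
--             continue
--
--         eq2 = email.find("=", eq1 + 1)
--         if eq2 < 0 or eq2 >= at:
--             ap(email);
--             continue
--
--         eq3 = email.find("=", eq2 + 1)
--         if eq3 < 0 or eq3 >= at:
--             ap(email);
--             continue
--
--         orig_domain = email[eq2 + 1: eq3]
--         orig_local = email[eq3 + 1: at]
--         if not orig_domain or not orig_local:
--             ap(email);
--             continue
--
--         ap(orig_local + "@" + orig_domain)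
--
--     return out
-- ===== SOURCE B (Python) =====
-- from typing import Iterable, List
--
-- def convert_srs_batch(emails: Iterable[str]) -> List[str]:
--     out: List[str] = []
--     for email in emails:
--         res = email
--         at = email.find("@")
--         if email and at >= 0:
--             local = email[:at]
--             p = local.find("srs")
--             if p >= 0 and (p == 0 or local[p - 1] == "+"):
--                 parts = local[p:].split("=", 4)
--                 if len(parts) == 5 and parts[3] and parts[4]:
--                     res = parts[4] + "@" + parts[3]
--         out.append(res)
--     return out
-- ===== Notes on version B (the rewrite author's own statement) =====
-- stated objective: simpler
-- what changed: A scans the whole email with four sequential find('=') calls each bounded against the '@' position and slices the result out of the full string; B slices the local part off once, and replaces the four-probe chain by a single split('=', 4) of the SRS-prefixed local part, reading the original domain and local as parts[3] and parts[4].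
import Mathlib
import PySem

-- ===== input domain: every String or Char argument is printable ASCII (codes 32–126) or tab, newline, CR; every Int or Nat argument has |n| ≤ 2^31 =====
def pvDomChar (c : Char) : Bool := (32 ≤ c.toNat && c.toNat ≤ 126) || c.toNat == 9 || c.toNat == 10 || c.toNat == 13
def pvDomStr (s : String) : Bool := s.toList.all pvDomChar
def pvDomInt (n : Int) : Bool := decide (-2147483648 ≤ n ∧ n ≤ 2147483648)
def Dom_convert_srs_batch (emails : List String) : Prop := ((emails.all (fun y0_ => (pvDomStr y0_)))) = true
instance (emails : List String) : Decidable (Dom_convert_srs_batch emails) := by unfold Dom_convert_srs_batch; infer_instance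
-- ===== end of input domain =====

-- B replaces A's hand-rolled chain of four sequential '=' find/bound checks by one
-- split('=', 4) of the SRS part of the local part; objective: simpler.

-- ===== PORT A =====
-- per-email body of A, step for step on the character list
def pvSrsA (e : List Char) : List Char :=
  if e.isEmpty then e else
  let at_ := PySem.Chars.find e ['@']
  if at_ < 0 then e else
  let p := PySem.Chars.find e ['s','r','s']
  if p < 0 ∨ at_ ≤ p then e else
  if p ≠ 0 ∧ ¬ PySem.List.pyGet? e (p-1) = some '+' then e else
  let eq0 := PySem.Chars.findFrom e ['='] p
  if eq0 < 0 ∨ at_ ≤ eq0 then e else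
  let eq1 := PySem.Chars.findFrom e ['='] (eq0+1)
  if eq1 < 0 ∨ at_ ≤ eq1 then e else
  let eq2 := PySem.Chars.findFrom e ['='] (eq1+1)
  if eq2 < 0 ∨ at_ ≤ eq2 then e else
  let eq3 := PySem.Chars.findFrom e ['='] (eq2+1)
  if eq3 < 0 ∨ at_ ≤ eq3 then e else
  let od := PySem.List.slice e (some (eq2+1)) (some eq3)
  let ol := PySem.List.slice e (some (eq3+1)) (some at_)
  if od.isEmpty ∨ ol.isEmpty then e else ol ++ '@' :: od

def convert_srs_batch (emails : List String) : List String :=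
  emails.foldl (fun out email => out ++ [String.ofList (pvSrsA email.toList)]) []

-- ===== PORT B =====
-- per-email body of B: slice off the local part, one find of "srs", one split('=', 4)
def pvSrsB (e : List Char) : List Char :=
  let at_ := PySem.Chars.find e ['@']
  if ¬ e.isEmpty ∧ 0 ≤ at_ then
    let loc := PySem.List.slice e none (some at_)
    let p := PySem.Chars.find loc ['s','r','s']
    if 0 ≤ p ∧ (p = 0 ∨ PySem.List.pyGet? loc (p-1) = some '+') then
      match PySem.Chars.splitMax? (PySem.List.slice loc (some p) none) ['='] 4 with
      | some parts =>
          if parts.length = 5 ∧ parts.getD 3 [] ≠ [] ∧ parts.getD 4 [] ≠ [] then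
            parts.getD 4 [] ++ '@' :: parts.getD 3 []
          else e
      | none => e
    else e
  else e

def convert_srs_batch_alt (emails : List String) : List String :=
  emails.foldl (fun out email => out ++ [String.ofList (pvSrsB email.toList)]) []

-- ===== PRECONDITION & SPEC =====
def Spec_convert_srs_batch (emails : List String) (out : List String) : Prop := out = convert_srs_batch_alt emails
instance (emails : List String) (out : List String) : Decidable (Spec_convert_srs_batch emails out) := by unfold Spec_convert_srs_batch; infer_instance

-- ===== CLAIM (what is proved, stated in full; the proofs are below) =====
def Claim_equal_convert_srs_batch : Prop := ∀ (emails : List String), Dom_convert_srs_batch emails → Spec_convert_srs_batch emails (convert_srs_batch emails)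

-- ===== LEMMAS AND PROOFS =====


theorem pv_find_go_shift (sub : List Char) : ∀ (l : List Char) (k : Nat),
    PySem.Chars.find.go sub l k =
      if PySem.Chars.find.go sub l 0 = -1 then -1 else PySem.Chars.find.go sub l 0 + k := by
  intro l
  induction l with
  | nil =>
    intro k
    have h0 : ∀ k' : Nat, PySem.Chars.find.go sub [] k' = if sub.isEmpty then (k':Int) else -1 :=
      fun _ => rfl
    rw [h0 k, h0 0]
    by_cases h : sub.isEmpty <;> simp [h]
  | cons x t ih =>
    intro k
    have h0 : ∀ k' : Nat, PySem.Chars.find.go sub (x::t) k'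
        = if sub.isPrefixOf (x::t) then (k':Int) else PySem.Chars.find.go sub t (k'+1) := fun _ => rfl
    rw [h0 k, h0 0]
    by_cases h : sub.isPrefixOf (x::t)
    · simp [h]
    · simp only [h, Bool.false_eq_true, if_false]
      rw [ih (k+1), ih 1]
      by_cases h2 : PySem.Chars.find.go sub t 0 = -1
      · simp [h2]
      · simp only [h2, if_false]
        have hge : -1 ≤ PySem.Chars.find.go sub t 0 := PySem.Chars.neg_one_le_find t sub
        rw [if_neg (by omega)]
        push_cast
        ring

theorem pv_find_cons (x : Char) (t : List Char) (c : Char) :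
    PySem.Chars.find (x :: t) [c] =
      if x = c then 0
      else if PySem.Chars.find t [c] = -1 then -1 else PySem.Chars.find t [c] + 1 := by
  show PySem.Chars.find.go [c] (x::t) 0 = _
  have h1 : PySem.Chars.find.go [c] (x::t) 0
      = if [c].isPrefixOf (x::t) then (0:Int) else PySem.Chars.find.go [c] t 1 := rfl
  rw [h1, pv_find_go_shift [c] t 1,
    show PySem.Chars.find.go [c] t 0 = PySem.Chars.find t [c] from rfl]
  have h2 : [c].isPrefixOf (x::t) = (c == x) := by simp [List.isPrefixOf]
  rw [h2]
  by_cases hx : x = c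
  · simp [hx]
  · have hcx : (c == x) = false := by simp [Ne.symm hx]
    rw [hcx]
    simp only [Bool.false_eq_true, if_false, hx]
    norm_num

theorem pv_find_eq_of (s sub : List Char) (k : Nat)
    (h1 : sub <+: s.drop k) (h2 : ∀ i, i < k → ¬ sub <+: s.drop i) :
    PySem.Chars.find s sub = (k : Int) := by
  have hnn : 0 ≤ PySem.Chars.find s sub := by
    rw [PySem.Chars.find_nonneg_iff]
    rw [← PySem.Chars.isIn_iff_infix, ← PySem.Chars.exists_prefix_drop_iff_isIn]
    exact ⟨k, h1⟩
  obtain ⟨hocc, hmin⟩ := PySem.Chars.find_spec hnn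
  have : (PySem.Chars.find s sub).toNat = k := by
    rcases lt_trichotomy (PySem.Chars.find s sub).toNat k with h | h | h
    · exact absurd hocc (h2 _ h)
    · exact h
    · exact absurd h1 (hmin k h)
  omega

theorem pv_prefix_drop_len (x sub : List Char) (f : Nat) (hsub : sub ≠ [])
    (h : sub <+: x.drop f) : f + sub.length ≤ x.length := by
  have hle := h.length_le
  simp only [List.length_drop] at hle
  have hlen : 0 < sub.length := List.length_pos_of_ne_nil hsub
  omega


theorem pv_occ_take (t sub : List Char) (m j : Nat) (hsub : sub ≠ []) :
    sub <+: (t.take m).drop j ↔ (sub <+: t.drop j ∧ j + sub.length ≤ m) := by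
  have hlen : 0 < sub.length := List.length_pos_of_ne_nil hsub
  rw [List.drop_take, List.prefix_take_iff]
  constructor
  · rintro ⟨h1, h2⟩
    exact ⟨h1, by omega⟩
  · rintro ⟨h1, h2⟩
    exact ⟨h1, by omega⟩

theorem pv_find_take_eq (t sub : List Char) (m : Nat) (hsub : sub ≠ [])
    (h : 0 ≤ PySem.Chars.find (t.take m) sub) :
    PySem.Chars.find t sub = PySem.Chars.find (t.take m) sub := by
  obtain ⟨hocc, hmin⟩ := PySem.Chars.find_spec h
  set f := (PySem.Chars.find (t.take m) sub).toNat with hf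
  rw [pv_occ_take t sub m f hsub] at hocc
  have heq : PySem.Chars.find t sub = (f : Int) := by
    apply pv_find_eq_of t sub f hocc.1
    intro i hi hpre
    exact hmin i hi ((pv_occ_take t sub m i hsub).mpr ⟨hpre, by omega⟩)
  omega

theorem pv_find_take_len (t sub : List Char) (m : Nat) (hsub : sub ≠ [])
    (h : 0 ≤ PySem.Chars.find (t.take m) sub) :
    (PySem.Chars.find (t.take m) sub).toNat + sub.length ≤ min m t.length := by
  obtain ⟨hocc, -⟩ := PySem.Chars.find_spec h
  have := pv_prefix_drop_len (t.take m) sub _ hsub hocc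
  simp only [List.length_take] at this
  omega

theorem pv_find_take_nonneg (t sub : List Char) (m : Nat) (hsub : sub ≠ [])
    (h0 : 0 ≤ PySem.Chars.find t sub)
    (h1 : (PySem.Chars.find t sub).toNat + sub.length ≤ m) :
    0 ≤ PySem.Chars.find (t.take m) sub := by
  obtain ⟨hocc, -⟩ := PySem.Chars.find_spec h0
  rw [PySem.Chars.find_nonneg_iff, ← PySem.Chars.isIn_iff_infix,
    ← PySem.Chars.exists_prefix_drop_iff_isIn]
  exact ⟨_, (pv_occ_take t sub m _ hsub).mpr ⟨hocc, h1⟩⟩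


def pvSplit1 (c : Char) : Nat → List Char → List Char → List (List Char)
  | 0, l, cur => [cur.reverse ++ l]
  | _+1, [], cur => [cur.reverse]
  | m+1, x :: t, cur =>
      if x = c then cur.reverse :: pvSplit1 c m t [] else pvSplit1 c (m+1) t (x :: cur)

theorem pv_go_eq_split1 (c : Char) : ∀ (fuel : Nat) (l : List Char) (m : Nat)
    (cur : List Char) (acc : List (List Char)), l.length < fuel →
    PySem.Chars.splitOnMax.go [c] fuel m l cur acc = acc.reverse ++ pvSplit1 c m l cur := by
  intro fuel
  induction fuel with
  | zero => intro l m cur acc h; omega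
  | succ f ih =>
    intro l m cur acc h
    match l with
    | [] =>
      have h1 : PySem.Chars.splitOnMax.go [c] (f+1) m [] cur acc = (cur.reverse :: acc).reverse := rfl
      rw [h1]
      match m with
      | 0 => simp [pvSplit1]
      | m+1 => simp [pvSplit1]
    | x :: rest =>
      have h1 : PySem.Chars.splitOnMax.go [c] (f+1) m (x :: rest) cur acc =
          if m = 0 then ((cur.reverse ++ (x :: rest)) :: acc).reverse
          else if [c].isPrefixOf (x :: rest) = true then
            PySem.Chars.splitOnMax.go [c] f (m - 1) (List.drop 1 (x :: rest)) [] (cur.reverse :: acc)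
          else PySem.Chars.splitOnMax.go [c] f m rest (x :: cur) acc := rfl
      rw [h1]
      have hpre : [c].isPrefixOf (x :: rest) = (c == x) := by simp [List.isPrefixOf]
      match m with
      | 0 => simp [pvSplit1]
      | m+1 =>
        simp only [Nat.succ_ne_zero, if_false, hpre, List.drop_one, List.tail_cons,
          Nat.add_sub_cancel]
        by_cases hx : x = c
        · have : (c == x) = true := by simp [hx]
          rw [this, if_pos rfl]
          rw [ih rest m [] (cur.reverse :: acc) (by simp at h ⊢; omega)]
          simp [pvSplit1, hx]
        · have : (c == x) = false := by simp [Ne.symm hx]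
          rw [this]
          simp only [Bool.false_eq_true, if_false]
          rw [ih rest (m+1) (x :: cur) acc (by simp at h ⊢; omega)]
          simp [pvSplit1, hx]

theorem pv_splitOnMax_eq_split1 (c : Char) (l : List Char) :
    PySem.Chars.splitOnMax l [c] 4 = pvSplit1 c 4 l [] := by
  have h1 : PySem.Chars.splitOnMax l [c] 4
      = PySem.Chars.splitOnMax.go [c] (l.length + 1) 4 l [] [] := by
    simp [PySem.Chars.splitOnMax]
  rw [h1, pv_go_eq_split1 c (l.length + 1) l 4 [] [] (by omega)]
  simp

theorem pv_split1_no (c : Char) (m : Nat) : ∀ (l cur : List Char),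
    PySem.Chars.find l [c] = -1 → pvSplit1 c m l cur = [cur.reverse ++ l] := by
  intro l
  induction l with
  | nil =>
    intro cur _
    match m with
    | 0 => simp [pvSplit1]
    | m+1 => simp [pvSplit1]
  | cons x t ih =>
    intro cur hfind
    rw [pv_find_cons] at hfind
    by_cases hx : x = c
    · simp [hx] at hfind
    · have ht : PySem.Chars.find t [c] = -1 := by
        by_contra hne
        simp [hx, hne] at hfind
        have := PySem.Chars.neg_one_le_find t [c]
        omega
      match m with
      | 0 => simp [pvSplit1]
      | m+1 =>
        simp only [pvSplit1, hx, if_false]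
        rw [ih (x :: cur) ht]
        simp

theorem pv_split1_yes (c : Char) : ∀ (m : Nat) (l cur : List Char) (j : Nat),
    PySem.Chars.find l [c] = (j : Int) →
    pvSplit1 c (m+1) l cur = (cur.reverse ++ l.take j) :: pvSplit1 c m (l.drop (j+1)) [] := by
  intro m l
  induction l generalizing m with
  | nil =>
    intro cur j hfind
    have : PySem.Chars.find ([] : List Char) [c] = -1 := rfl
    rw [this] at hfind; omega
  | cons x t ih =>
    intro cur j hfind
    rw [pv_find_cons] at hfind
    by_cases hx : x = c
    · rw [if_pos hx] at hfind
      have hj : j = 0 := by omega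
      subst hj
      simp [pvSplit1, hx]
    · rw [if_neg hx] at hfind
      have hge := PySem.Chars.neg_one_le_find t [c]
      by_cases hne : PySem.Chars.find t [c] = -1
      · rw [if_pos hne] at hfind; omega
      · rw [if_neg hne] at hfind
        obtain ⟨j', hj'⟩ : ∃ j' : Nat, PySem.Chars.find t [c] = (j' : Int) :=
          ⟨(PySem.Chars.find t [c]).toNat, by omega⟩
        have hjj : j = j' + 1 := by omega
        subst hjj
        simp only [pvSplit1, hx, if_false]
        rw [ih m (x :: cur) j' hj']
        simp [List.take_succ_cons, List.drop_succ_cons]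

theorem pv_split1_yes_4 (c : Char) (l cur : List Char) (j : Nat)
    (h : PySem.Chars.find l [c] = (j : Int)) :
    pvSplit1 c 4 l cur = (cur.reverse ++ l.take j) :: pvSplit1 c 3 (l.drop (j+1)) [] :=
  pv_split1_yes c 3 l cur j h
theorem pv_split1_yes_3 (c : Char) (l cur : List Char) (j : Nat)
    (h : PySem.Chars.find l [c] = (j : Int)) :
    pvSplit1 c 3 l cur = (cur.reverse ++ l.take j) :: pvSplit1 c 2 (l.drop (j+1)) [] :=
  pv_split1_yes c 2 l cur j h
theorem pv_split1_yes_2 (c : Char) (l cur : List Char) (j : Nat)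
    (h : PySem.Chars.find l [c] = (j : Int)) :
    pvSplit1 c 2 l cur = (cur.reverse ++ l.take j) :: pvSplit1 c 1 (l.drop (j+1)) [] :=
  pv_split1_yes c 1 l cur j h
theorem pv_split1_yes_1 (c : Char) (l cur : List Char) (j : Nat)
    (h : PySem.Chars.find l [c] = (j : Int)) :
    pvSplit1 c 1 l cur = (cur.reverse ++ l.take j) :: pvSplit1 c 0 (l.drop (j+1)) [] :=
  pv_split1_yes c 0 l cur j h
theorem pv_split1_zero (c : Char) (l cur : List Char) : pvSplit1 c 0 l cur = [cur.reverse ++ l] := by cases l <;> rfl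


theorem pv_eqstep (e : List Char) (A s : Nat) (hA : A ≤ e.length) (hs : s ≤ A) :
    (PySem.Chars.find ((e.take A).drop s) ['='] = -1 →
      PySem.Chars.findFrom e ['='] (s : Int) none = -1 ∨
      (A : Int) ≤ PySem.Chars.findFrom e ['='] (s : Int) none) ∧
    (∀ j : Nat, PySem.Chars.find ((e.take A).drop s) ['='] = (j : Int) →
      PySem.Chars.findFrom e ['='] (s : Int) none = ((s + j : Nat) : Int) ∧ s + j < A) := by
  have hff := PySem.Chars.findFrom_natCast e ['='] s (hs.trans hA)
  have hdt : (e.take A).drop s = (e.drop s).take (A - s) := List.drop_take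
  constructor
  · intro hneg
    rw [hdt] at hneg
    by_cases h0 : PySem.Chars.find (e.drop s) ['='] = -1
    · left; rw [hff, if_pos h0]
    · right
      have hge := PySem.Chars.neg_one_le_find (e.drop s) ['=']
      have hnn : 0 ≤ PySem.Chars.find (e.drop s) ['='] := by omega
      have hfar : ¬ ((PySem.Chars.find (e.drop s) ['=']).toNat + 1 ≤ A - s) := by
        intro hle
        have := pv_find_take_nonneg (e.drop s) ['='] (A - s) (by simp) hnn (by simpa using hle)
        omega
      rw [hff, if_neg h0]
      omega
  · intro j hj
    rw [hdt] at hj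
    have hnn : 0 ≤ PySem.Chars.find ((e.drop s).take (A - s)) ['='] := by rw [hj]; positivity
    have heq := pv_find_take_eq (e.drop s) ['='] (A - s) (by simp) hnn
    have hlen := pv_find_take_len (e.drop s) ['='] (A - s) (by simp) hnn
    rw [hj] at heq hlen
    simp only [List.length_cons, List.length_nil] at hlen
    have hjA : s + j < A := by omega
    rw [hff, if_neg (by rw [heq]; omega)]
    refine ⟨by rw [heq]; push_cast; ring, hjA⟩

-- the per-email bodies of the two ports agree on every character list
theorem pv_one_eq (e : List Char) : pvSrsA e = pvSrsB e := by
  unfold pvSrsA pvSrsB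
  by_cases he : e.isEmpty
  · simp [he]
  simp only [he, Bool.false_eq_true, if_false, not_false_iff, true_and]
  by_cases hneg : PySem.Chars.find e ['@'] < 0
  · rw [if_pos hneg, if_neg (by omega)]
  rw [if_neg hneg]
  have hnnA : 0 ≤ PySem.Chars.find e ['@'] := by omega
  rw [if_pos hnnA]
  -- landmark
  set At := PySem.Chars.find e ['@'] with hAt
  obtain ⟨A, hA⟩ : ∃ A : Nat, At = (A : Int) := ⟨At.toNat, by omega⟩
  obtain ⟨hoccAt, hminAt⟩ := PySem.Chars.find_spec hnnA
  rw [← hAt, hA] at hoccAt hminAt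
  simp only [Int.toNat_natCast] at hoccAt hminAt
  have hAlen : A + 1 ≤ e.length := pv_prefix_drop_len e ['@'] A (by simp) hoccAt
  have hatA : e[A]? = some '@' := by
    obtain ⟨tl, htl⟩ := hoccAt
    have hdA : e.drop A = '@' :: tl := by simpa using htl.symm
    have : (e.drop A)[0]? = e[A]? := by simp [List.getElem?_drop]
    rw [← this, hdA]
    rfl
  have hloc : PySem.List.slice e none (some At) = e.take A := by
    rw [hA, PySem.List.slice_to e (by positivity)]
    simp
  rw [hloc]
  set pA := PySem.Chars.find e ['s','r','s'] with hpA
  set pB := PySem.Chars.find (e.take A) ['s','r','s'] with hpB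
  have hsrs_ne : (['s','r','s'] : List Char) ≠ [] := by simp
  by_cases hpBnn : 0 ≤ pB
  case neg =>
    have hAguard : pA < 0 ∨ At ≤ pA := by
      by_contra hc
      rw [not_or, not_lt, not_le] at hc
      obtain ⟨h1, h2⟩ := hc
      obtain ⟨P, hP⟩ : ∃ P : Nat, pA = (P : Int) := ⟨pA.toNat, by omega⟩
      obtain ⟨hoccS, -⟩ := PySem.Chars.find_spec h1
      rw [← hpA, hP] at hoccS
      simp only [Int.toNat_natCast] at hoccS
      have hPA : P < A := by omega
      have hP3 : P + 3 ≤ A := by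
        by_contra hcc
        obtain ⟨t2, ht2⟩ := hoccS
        have hd : e.drop P = 's' :: 'r' :: 's' :: t2 := by simpa using ht2.symm
        have hAP : A = P + 1 ∨ A = P + 2 := by omega
        have hgA : e[A]? = (e.drop P)[A - P]? := by
          rw [List.getElem?_drop]
          congr 1
          omega
        rcases hAP with h | h <;>
          · rw [hatA, hd] at hgA
            rw [h] at hgA
            simp at hgA
      have := pv_find_take_nonneg e ['s','r','s'] A hsrs_ne h1 (by simp; omega)
      exact hpBnn this
    rw [if_pos hAguard, if_neg (fun hc => hpBnn hc.1)]
  case pos =>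
    have hpApB : pA = pB := pv_find_take_eq e ['s','r','s'] A hsrs_ne hpBnn
    have hlen := pv_find_take_len e ['s','r','s'] A hsrs_ne hpBnn
    rw [← hpB] at hlen
    obtain ⟨P, hP⟩ : ∃ P : Nat, pB = (P : Int) := ⟨pB.toNat, by omega⟩
    rw [hP] at hlen
    simp only [Int.toNat_natCast, List.length_cons, List.length_nil] at hlen
    have hP3 : P + 3 ≤ A := by omega
    rw [if_neg (by rw [hpApB, hP, hA]; omega)]
    have hgeteq : P ≠ 0 → PySem.List.pyGet? (e.take A) (pB - 1) = PySem.List.pyGet? e (pA - 1) := by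
      intro hP0
      rw [hpApB, hP, show ((P:Int) - 1) = ((P-1 : Nat) : Int) by omega,
        PySem.List.pyGet?_natCast, PySem.List.pyGet?_natCast, List.getElem?_take]
      rw [if_pos (by omega)]
    by_cases hBc2 : (pB = 0 ∨ PySem.List.pyGet? (e.take A) (pB - 1) = some '+')
    · have hBcT : 0 ≤ pB ∧ (pB = 0 ∨ PySem.List.pyGet? (e.take A) (pB - 1) = some '+') :=
        ⟨hpBnn, hBc2⟩
      rw [if_pos hBcT]
      have hAc : ¬ (pA ≠ 0 ∧ ¬ PySem.List.pyGet? e (pA - 1) = some '+') := by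
        by_cases hP0 : P = 0
        · intro hc
          exact hc.1 (by rw [hpApB, hP, hP0]; rfl)
        · rcases hBc2 with h | h
          · rw [hP] at h
            exact absurd h (by simpa using hP0)
          · intro hc
            exact hc.2 (by rw [← hgeteq hP0]; exact h)
      rw [if_neg hAc]
      rw [hpApB, hP, hA]
      rw [PySem.List.slice_from (e.take A) (by positivity : (0:Int) ≤ (P:Int))]
      simp only [Int.toNat_natCast]
      have hspl : PySem.Chars.splitMax? ((e.take A).drop P) ['='] 4
          = some (pvSplit1 '=' 4 ((e.take A).drop P) []) := by
        rw [show PySem.Chars.splitMax? ((e.take A).drop P) ['='] 4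
            = some (PySem.Chars.splitOnMax ((e.take A).drop P) ['='] 4) from rfl,
          pv_splitOnMax_eq_split1]
      rw [hspl]
      show _ = if (pvSplit1 '=' 4 ((e.take A).drop P) []).length = 5 ∧
          (pvSplit1 '=' 4 ((e.take A).drop P) []).getD 3 [] ≠ [] ∧
          (pvSplit1 '=' 4 ((e.take A).drop P) []).getD 4 [] ≠ [] then
          (pvSplit1 '=' 4 ((e.take A).drop P) []).getD 4 [] ++ '@' ::
            (pvSplit1 '=' 4 ((e.take A).drop P) []).getD 3 []
        else e
      have hA' : A ≤ e.length := by omega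
      have step0 := pv_eqstep e A P hA' (by omega)
      by_cases hf0 : PySem.Chars.find ((e.take A).drop P) ['='] = -1
      · rw [pv_split1_no '=' 4 _ [] hf0]
        rcases step0.1 hf0 with h | h
        · rw [if_pos (Or.inl (by rw [h]; norm_num))]
          try simp
        · rw [if_pos (Or.inr h)]
          try simp
      · obtain ⟨j0, hj0⟩ : ∃ j : Nat, PySem.Chars.find ((e.take A).drop P) ['='] = (j : Int) :=
          ⟨(PySem.Chars.find ((e.take A).drop P) ['=']).toNat, by have := PySem.Chars.neg_one_le_find ((e.take A).drop P) ['=']; omega⟩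
        obtain ⟨he0, hlt0⟩ := step0.2 j0 hj0
        rw [pv_split1_yes_4 '=' _ [] j0 hj0, he0, if_neg (by omega)]
        rw [show ((P + j0 : Nat) : Int) + 1 = ((P + j0 + 1 : Nat) : Int) by push_cast; ring]
        rw [show ((e.take A).drop P).drop (j0+1) = (e.take A).drop (P+j0+1) by
          rw [List.drop_drop]; congr 1; try omega]
        have step1 := pv_eqstep e A (P+j0+1) hA' (by omega)
        by_cases hf1 : PySem.Chars.find ((e.take A).drop (P+j0+1)) ['='] = -1
        · rw [pv_split1_no '=' 3 _ [] hf1]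
          rcases step1.1 hf1 with h | h
          · rw [if_pos (Or.inl (by rw [h]; norm_num))]
            try simp
          · rw [if_pos (Or.inr h)]
            try simp
        · obtain ⟨j1, hj1⟩ : ∃ j : Nat, PySem.Chars.find ((e.take A).drop (P+j0+1)) ['='] = (j : Int) :=
            ⟨(PySem.Chars.find ((e.take A).drop (P+j0+1)) ['=']).toNat, by have := PySem.Chars.neg_one_le_find ((e.take A).drop (P+j0+1)) ['=']; omega⟩
          obtain ⟨he1, hlt1⟩ := step1.2 j1 hj1
          rw [pv_split1_yes_3 '=' _ [] j1 hj1, he1, if_neg (by omega)]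
          rw [show ((P + j0 + 1 + j1 : Nat) : Int) + 1 = ((P + j0 + 1 + j1 + 1 : Nat) : Int) by push_cast; ring]
          rw [show ((e.take A).drop (P+j0+1)).drop (j1+1) = (e.take A).drop (P+j0+1+j1+1) by
            rw [List.drop_drop]; congr 1; try omega]
          have step2 := pv_eqstep e A (P+j0+1+j1+1) hA' (by omega)
          by_cases hf2 : PySem.Chars.find ((e.take A).drop (P+j0+1+j1+1)) ['='] = -1
          · rw [pv_split1_no '=' 2 _ [] hf2]
            rcases step2.1 hf2 with h | h
            · rw [if_pos (Or.inl (by rw [h]; norm_num))]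
              try simp
            · rw [if_pos (Or.inr h)]
              try simp
          · obtain ⟨j2, hj2⟩ : ∃ j : Nat, PySem.Chars.find ((e.take A).drop (P+j0+1+j1+1)) ['='] = (j : Int) :=
              ⟨(PySem.Chars.find ((e.take A).drop (P+j0+1+j1+1)) ['=']).toNat, by have := PySem.Chars.neg_one_le_find ((e.take A).drop (P+j0+1+j1+1)) ['=']; omega⟩
            obtain ⟨he2, hlt2⟩ := step2.2 j2 hj2
            rw [pv_split1_yes_2 '=' _ [] j2 hj2, he2, if_neg (by omega)]
            rw [show ((P + j0 + 1 + j1 + 1 + j2 : Nat) : Int) + 1 = ((P + j0 + 1 + j1 + 1 + j2 + 1 : Nat) : Int) by push_cast; ring]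
            rw [show ((e.take A).drop (P+j0+1+j1+1)).drop (j2+1) = (e.take A).drop (P+j0+1+j1+1+j2+1) by
              rw [List.drop_drop]; congr 1; try omega]
            have step3 := pv_eqstep e A (P+j0+1+j1+1+j2+1) hA' (by omega)
            by_cases hf3 : PySem.Chars.find ((e.take A).drop (P+j0+1+j1+1+j2+1)) ['='] = -1
            · rw [pv_split1_no '=' 1 _ [] hf3]
              rcases step3.1 hf3 with h | h
              · rw [if_pos (Or.inl (by rw [h]; norm_num))]
                simp
              · rw [if_pos (Or.inr h)]
                simp
            · obtain ⟨j3, hj3⟩ : ∃ j : Nat, PySem.Chars.find ((e.take A).drop (P+j0+1+j1+1+j2+1)) ['='] = (j : Int) :=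
                ⟨(PySem.Chars.find ((e.take A).drop (P+j0+1+j1+1+j2+1)) ['=']).toNat, by have := PySem.Chars.neg_one_le_find ((e.take A).drop (P+j0+1+j1+1+j2+1)) ['=']; omega⟩
              obtain ⟨he3, hlt3⟩ := step3.2 j3 hj3
              rw [pv_split1_yes_1 '=' _ [] j3 hj3, he3, if_neg (by omega)]
              rw [pv_split1_zero]
              rw [show ((P + j0 + 1 + j1 + 1 + j2 + 1 + j3 : Nat) : Int) + 1 = ((P + j0 + 1 + j1 + 1 + j2 + 1 + j3 + 1 : Nat) : Int) by push_cast; ring]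
              rw [PySem.List.slice_natCast e (P+j0+1+j1+1+j2+1) (P+j0+1+j1+1+j2+1+j3),
                PySem.List.slice_natCast e (P+j0+1+j1+1+j2+1+j3+1) A]
              rw [show P+j0+1+j1+1+j2+1+j3 - (P+j0+1+j1+1+j2+1) = j3 by omega]
              rw [show ((e.take A).drop (P+j0+1+j1+1+j2+1)).take j3
                  = List.take j3 (List.drop (P+j0+1+j1+1+j2+1) e) by
                rw [List.drop_take, List.take_take, min_eq_left (by omega)]]
              rw [show ((e.take A).drop (P+j0+1+j1+1+j2+1)).drop (j3+1)
                  = List.take (A - (P+j0+1+j1+1+j2+1+j3+1)) (List.drop (P+j0+1+j1+1+j2+1+j3+1) e) by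
                rw [List.drop_drop, show P+j0+1+j1+1+j2+1+(j3+1) = P+j0+1+j1+1+j2+1+j3+1 by omega,
                  List.drop_take]]
              simp only [List.length_cons, List.length_nil, List.isEmpty_iff, List.nil_append,
                List.reverse_nil, List.getD_cons_succ, List.getD_cons_zero]
              by_cases h1 : List.take j3 (List.drop (P+j0+1+j1+1+j2+1) e) = [] <;>
                by_cases h2 : List.take (A - (P+j0+1+j1+1+j2+1+j3+1)) (List.drop (P+j0+1+j1+1+j2+1+j3+1) e) = [] <;>
                simp [h1, h2]
    · rw [not_or] at hBc2
      obtain ⟨hBc2a, hBc2b⟩ := hBc2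
      have hP0 : P ≠ 0 := by
        intro h
        exact hBc2a (by rw [hP, h]; rfl)
      have hAc : pA ≠ 0 ∧ ¬ PySem.List.pyGet? e (pA - 1) = some '+' := by
        refine ⟨by rw [hpApB, hP]; simpa using hP0, ?_⟩
        rw [← hgeteq hP0]
        exact hBc2b
      have hBcF : ¬ (0 ≤ pB ∧ (pB = 0 ∨ PySem.List.pyGet? (e.take A) (pB - 1) = some '+')) :=
        fun hc => hBc2b (hc.2.resolve_left (by rw [hP]; simpa using hP0))
      rw [if_pos hAc, if_neg hBcF]


-- ===== VERDICT (by name: the statement is the Claim_ definition above) =====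
theorem convert_srs_batch_spec : Claim_equal_convert_srs_batch := by
  intro emails _
  unfold Spec_convert_srs_batch convert_srs_batch convert_srs_batch_alt
  simp only [pv_one_eq]
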